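-- pv_equiv track=rewrite | github.com/jhynes6/vectara | summarizers/website_summarizer.py | _extract_lists_from_analysis
-- ===== SOURCE A (Python) =====
-- def _extract_lists_from_analysis(analysis: str) -> tuple:
--     """
--     Extract services and industries lists from analysis text
--
--     Args:
--         analysis: The analysis text from the agent
--
--     Returns:
--         Tuple of (services_set, industries_set)
--     """
--     services = set()
--     industries = set()
--
--     lines = analysis.split('\n')
--     current_section = None
--
--     for line in lines:
--         line = line.strip()
--
--         # Detect sections
--         if '## SERVICES OFFERED' in line:
--             current_section = 'services'
--             continue
--         elif '## TARGET INDUSTRIES' in line: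
--             current_section = 'industries'
--             continue
--         elif line.startswith('## '):
--             current_section = None
--             continue
--
--         # Extract items from lists
--         if current_section and line.startswith('-'):
--             # Remove bullet point and clean up
--             item = line[1:].strip()
--             if item.startswith('**') and item.endswith('**'):
--                 item = item[2:-2]  # Remove bold formatting
--
--             # Remove additional descriptions after parentheses or colons
--             if '(' in item:
--                 item = item.split('(')[0].strip()
--             if ':' in item:
--                 item = item.split(':')[0].strip()
--
--             # Skip empty items or notes
--             if item and not item.lower().startswith(('none', 'no ', 'not ')):
--                 if current_section == 'services':
--                     services.add(item)
--                 elif current_section == 'industries':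
--                     industries.add(item)
--
--     return services, industries
-- ===== SOURCE B (Python) =====
-- def _clean(raw):
--     """Clean one bullet item (text after the '-'); None if it should be skipped."""
--     item = raw.strip()
--     if item.startswith('**') and item.endswith('**'):
--         item = item[2:-2]
--     if '(' in item:
--         item = item.split('(')[0].strip()
--     if ':' in item:
--         item = item.split(':')[0].strip()
--     if item and not item.lower().startswith(('none', 'no ', 'not ')):
--         return item
--     return None
--
--
-- def _collect(dest, body):
--     """Add every valid bullet item of a section body to dest."""
--     for line in body:
--         if line.startswith('-'):
--             item = _clean(line[1:])
--             if item is not None: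
--                 dest.add(item)
--
--
-- def _extract_lists_from_analysis(analysis: str) -> tuple:
--     # Phase 1: segment the stripped lines into (target, body) groups,
--     # one group per header-delimited block.
--     groups = []
--     target, body = None, []
--     for raw in analysis.split('\n'):
--         line = raw.strip()
--         if '## SERVICES OFFERED' in line:
--             groups.append((target, body))
--             target, body = 'services', []
--         elif '## TARGET INDUSTRIES' in line:
--             groups.append((target, body))
--             target, body = 'industries', []
--         elif line.startswith('## '):
--             groups.append((target, body))
--             target, body = None, []
--         else:
--             body.append(line)
--     groups.append((target, body))
--
--     # Phase 2: parse the bullet items of each recognised section.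
--     services, industries = set(), set()
--     for target, body in groups:
--         if target == 'services':
--             _collect(services, body)
--         elif target == 'industries':
--             _collect(industries, body)
--     return services, industries
-- ===== Notes on version B (the rewrite author's own statement) =====
-- stated objective: alternative
-- what changed: Replaces the flat stateful line scan with a two-phase shape: first segment the stripped lines into header-delimited (target, body) groups, then parse each recognised group's bullet items into its set.
import Mathlib
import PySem

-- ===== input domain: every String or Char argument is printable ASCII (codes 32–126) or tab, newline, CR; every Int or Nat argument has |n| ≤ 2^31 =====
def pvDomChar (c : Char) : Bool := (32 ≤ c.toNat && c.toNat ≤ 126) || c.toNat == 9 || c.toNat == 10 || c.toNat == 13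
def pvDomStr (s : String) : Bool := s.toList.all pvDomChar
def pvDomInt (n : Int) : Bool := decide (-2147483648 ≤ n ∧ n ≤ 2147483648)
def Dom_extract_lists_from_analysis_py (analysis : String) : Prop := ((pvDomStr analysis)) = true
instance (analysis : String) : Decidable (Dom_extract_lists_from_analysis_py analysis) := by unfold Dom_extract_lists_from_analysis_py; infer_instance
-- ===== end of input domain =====

-- B replaces A's flat stateful line scan by a segment-then-parse two-phase decomposition (objective: alternative, same cost).

-- ===== PORT A =====
-- one step of A's for-loop; state = ((services, industries), current_section)
def pvAStep (st : (List String × List String) × Option String) (raw : String) :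
    (List String × List String) × Option String :=
  let line := PySem.Str.strip raw
  if PySem.Str.isIn "## SERVICES OFFERED" line then (st.1, some "services")
  else if PySem.Str.isIn "## TARGET INDUSTRIES" line then (st.1, some "industries")
  else if PySem.Str.startswith line "## " then (st.1, none)
  else
    match st.2 with
    | none => st
    | some sec =>
      if sec != "" && PySem.Str.startswith line "-" then
        let item := PySem.Str.strip (PySem.Str.slice line (some 1) none)
        let item := if PySem.Str.startswith item "**" && PySem.Str.endswith item "**" then
            PySem.Str.slice item (some 2) (some (-2)) else item
        let item := if PySem.Str.isIn "(" item then
            PySem.Str.strip (((PySem.Str.split? item "(").getD []).headD "") else item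
        let item := if PySem.Str.isIn ":" item then
            PySem.Str.strip (((PySem.Str.split? item ":").getD []).headD "") else item
        if item != "" && !(PySem.Str.startswith (PySem.Str.lower item) "none" ||
            PySem.Str.startswith (PySem.Str.lower item) "no " ||
            PySem.Str.startswith (PySem.Str.lower item) "not ") then
          if sec == "services" then ((PySem.Set.add st.1.1 item, st.1.2), st.2)
          else if sec == "industries" then ((st.1.1, PySem.Set.add st.1.2 item), st.2)
          else st
        else st
      else st

def extract_lists_from_analysis_py (analysis : String) : List String × List String :=
  (((PySem.Str.split? analysis "\n").getD []).foldl pvAStep (([], []), none)).1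

-- ===== PORT B =====
-- _clean: clean one bullet item (the text after '-'); none if it should be skipped
def pvClean (raw : String) : Option String :=
  let item := PySem.Str.strip raw
  let item := if PySem.Str.startswith item "**" && PySem.Str.endswith item "**" then
      PySem.Str.slice item (some 2) (some (-2)) else item
  let item := if PySem.Str.isIn "(" item then
      PySem.Str.strip (((PySem.Str.split? item "(").getD []).headD "") else item
  let item := if PySem.Str.isIn ":" item then
      PySem.Str.strip (((PySem.Str.split? item ":").getD []).headD "") else item
  if item != "" && !(PySem.Str.startswith (PySem.Str.lower item) "none" ||
      PySem.Str.startswith (PySem.Str.lower item) "no " ||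
      PySem.Str.startswith (PySem.Str.lower item) "not ") then some item
  else none

-- _collect: add every valid bullet item of a section body to dest
def pvCollect (dest : List String) (body : List String) : List String :=
  body.foldl (fun d line =>
    if PySem.Str.startswith line "-" then
      match pvClean (PySem.Str.slice line (some 1) none) with
      | some item => PySem.Set.add d item
      | none => d
    else d) dest

-- phase 1 step: state = (groups, target, body)
def pvPhase1Step (st : List (Option String × List String) × Option String × List String)
    (raw : String) : List (Option String × List String) × Option String × List String :=
  let line := PySem.Str.strip raw
  if PySem.Str.isIn "## SERVICES OFFERED" line then
    (st.1 ++ [(st.2.1, st.2.2)], some "services", [])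
  else if PySem.Str.isIn "## TARGET INDUSTRIES" line then
    (st.1 ++ [(st.2.1, st.2.2)], some "industries", [])
  else if PySem.Str.startswith line "## " then
    (st.1 ++ [(st.2.1, st.2.2)], none, [])
  else (st.1, st.2.1, st.2.2 ++ [line])

-- phase 2: parse one (target, body) group into the pair of sets
def pvProcGroup (si : List String × List String) (g : Option String × List String) :
    List String × List String :=
  match g.1 with
  | some t =>
    if t == "services" then (pvCollect si.1 g.2, si.2)
    else if t == "industries" then (si.1, pvCollect si.2 g.2)
    else si
  | none => si

def extract_lists_from_analysis_py_alt (analysis : String) : List String × List String :=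
  let st := ((PySem.Str.split? analysis "\n").getD []).foldl pvPhase1Step ([], none, [])
  let groups := st.1 ++ [(st.2.1, st.2.2)]
  groups.foldl pvProcGroup ([], [])

-- ===== PRECONDITION & SPEC =====
def Spec_extract_lists_from_analysis_py (analysis : String) (out : List String × List String) : Prop := out = extract_lists_from_analysis_py_alt analysis
instance (analysis : String) (out : List String × List String) : Decidable (Spec_extract_lists_from_analysis_py analysis out) := by unfold Spec_extract_lists_from_analysis_py; infer_instance

-- ===== CLAIM (what is proved, stated in full; the proofs are below) =====
def Claim_equal_extract_lists_from_analysis_py : Prop := ∀ (analysis : String), Dom_extract_lists_from_analysis_py analysis → Spec_extract_lists_from_analysis_py analysis (extract_lists_from_analysis_py analysis)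

-- ===== LEMMAS AND PROOFS =====
-- recursive form of B's phase-1 grouping (proof-only)
def pvGroups : List String → Option String → List String → List (Option String × List String)
  | [], t, body => [(t, body)]
  | raw :: rest, t, body =>
    let line := PySem.Str.strip raw
    if PySem.Str.isIn "## SERVICES OFFERED" line then (t, body) :: pvGroups rest (some "services") []
    else if PySem.Str.isIn "## TARGET INDUSTRIES" line then (t, body) :: pvGroups rest (some "industries") []
    else if PySem.Str.startswith line "## " then (t, body) :: pvGroups rest none []
    else pvGroups rest t (body ++ [line])

theorem pvPhase1_spec (lines : List String) : ∀ (gs : List (Option String × List String))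
    (t : Option String) (body : List String),
    (lines.foldl pvPhase1Step (gs, t, body)).1
        ++ [((lines.foldl pvPhase1Step (gs, t, body)).2.1,
             (lines.foldl pvPhase1Step (gs, t, body)).2.2)]
      = gs ++ pvGroups lines t body := by
  induction lines with
  | nil => intro gs t body; simp [pvGroups]
  | cons raw rest ih =>
    intro gs t body
    simp only [List.foldl_cons, pvPhase1Step, pvGroups]
    by_cases h1 : PySem.Str.isIn "## SERVICES OFFERED" (PySem.Str.strip raw) = true
    · rw [if_pos h1, if_pos h1, ih]
      simp only [List.append_assoc, List.singleton_append]
    · by_cases h2 : PySem.Str.isIn "## TARGET INDUSTRIES" (PySem.Str.strip raw) = true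
      · rw [if_neg h1, if_neg h1, if_pos h2, if_pos h2, ih]
        simp only [List.append_assoc, List.singleton_append]
      · by_cases h3 : PySem.Str.startswith (PySem.Str.strip raw) "## " = true
        · rw [if_neg h1, if_neg h1, if_neg h2, if_neg h2, if_pos h3, if_pos h3, ih]
          simp only [List.append_assoc, List.singleton_append]
        · rw [if_neg h1, if_neg h1, if_neg h2, if_neg h2, if_neg h3, if_neg h3, ih]

theorem pvProcGroup_services (si : List String × List String) (b : List String) :
    pvProcGroup si (some "services", b) = (pvCollect si.1 b, si.2) := rfl

theorem pvProcGroup_industries (si : List String × List String) (b : List String) :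
    pvProcGroup si (some "industries", b) = (si.1, pvCollect si.2 b) := rfl

theorem pvCollect_snoc (d b : List String) (l : String) :
    pvCollect d (b ++ [l])
      = (if PySem.Str.startswith l "-" then
          match pvClean (PySem.Str.slice l (some 1) none) with
          | some item => PySem.Set.add (pvCollect d b) item
          | none => pvCollect d b
        else pvCollect d b) := by
  unfold pvCollect
  rw [List.foldl_append]
  rfl

theorem pvStep_proc (si : List String × List String) (t : Option String)
    (body : List String) (raw : String)
    (h1 : ¬ PySem.Str.isIn "## SERVICES OFFERED" (PySem.Str.strip raw) = true)
    (h2 : ¬ PySem.Str.isIn "## TARGET INDUSTRIES" (PySem.Str.strip raw) = true)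
    (h3 : ¬ PySem.Str.startswith (PySem.Str.strip raw) "## " = true) :
    pvAStep (pvProcGroup si (t, body), t) raw
      = (pvProcGroup si (t, body ++ [PySem.Str.strip raw]), t) := by
  cases t with
  | none =>
    simp only [pvAStep]
    rw [if_neg h1, if_neg h2, if_neg h3]
    rfl
  | some sec =>
    simp only [pvAStep]
    rw [if_neg h1, if_neg h2, if_neg h3]
    by_cases hd : PySem.Str.startswith (PySem.Str.strip raw) "-" = true
    · by_cases hs : sec = "services"
      · subst hs
        have hcond : ("services" != "" && PySem.Str.startswith (PySem.Str.strip raw) "-") = true :=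
          (Bool.and_eq_true _ _).mpr ⟨by decide, hd⟩
        rw [if_pos hcond, pvProcGroup_services, pvProcGroup_services, pvCollect_snoc,
          if_pos hd]
        simp only [pvClean]
        rw [if_pos (show ("services" == "services") = true by decide)]
        split_ifs <;> rfl
      · by_cases hi : sec = "industries"
        · subst hi
          have hcond : ("industries" != "" && PySem.Str.startswith (PySem.Str.strip raw) "-") = true :=
            (Bool.and_eq_true _ _).mpr ⟨by decide, hd⟩
          rw [if_pos hcond, pvProcGroup_industries, pvProcGroup_industries, pvCollect_snoc,
            if_pos hd]
          simp only [pvClean]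
          rw [if_neg (show ¬ (("industries" == "services") = true) by decide),
            if_pos (show ("industries" == "industries") = true by decide)]
          split_ifs <;> rfl
        · have hpg : ∀ b, pvProcGroup si (some sec, b) = si := by
            intro b
            simp [pvProcGroup, hs, hi]
          rw [hpg, hpg]
          by_cases he : sec = ""
          · subst he
            have hcond : ¬ (("" != "" && PySem.Str.startswith (PySem.Str.strip raw) "-") = true) := by
              simp
            rw [if_neg hcond]
          · have hcond : (sec != "" && PySem.Str.startswith (PySem.Str.strip raw) "-") = true :=
              (Bool.and_eq_true _ _).mpr ⟨bne_iff_ne.mpr he, hd⟩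
            rw [if_pos hcond]
            simp only [beq_iff_eq]
            rw [if_neg hs, if_neg hi]
            split_ifs <;> rfl
    · have hcond : ∀ (sec' : String), ¬ ((sec' != "" && PySem.Str.startswith (PySem.Str.strip raw) "-") = true) :=
        fun _ hc => hd ((Bool.and_eq_true _ _).mp hc).2
      rw [if_neg (hcond sec)]
      by_cases hs : sec = "services"
      · subst hs
        rw [pvProcGroup_services, pvProcGroup_services, pvCollect_snoc, if_neg hd]
      · by_cases hi : sec = "industries"
        · subst hi
          rw [pvProcGroup_industries, pvProcGroup_industries, pvCollect_snoc, if_neg hd]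
        · have hpg : ∀ b, pvProcGroup si (some sec, b) = si := by
            intro b
            simp [pvProcGroup, hs, hi]
          rw [hpg, hpg]

theorem pvMain (lines : List String) : ∀ (t : Option String) (body : List String)
    (si : List String × List String),
    List.foldl pvProcGroup si (pvGroups lines t body)
      = (lines.foldl pvAStep (pvProcGroup si (t, body), t) ).1 := by
  induction lines with
  | nil => intro t body si; simp [pvGroups]
  | cons raw rest ih =>
    intro t body si
    simp only [pvGroups, List.foldl_cons]
    by_cases h1 : PySem.Str.isIn "## SERVICES OFFERED" (PySem.Str.strip raw) = true
    · have hA : pvAStep (pvProcGroup si (t, body), t) raw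
          = (pvProcGroup si (t, body), some "services") := by
        simp only [pvAStep]
        rw [if_pos h1]
      rw [if_pos h1, List.foldl_cons, ih, hA]
      rfl
    · by_cases h2 : PySem.Str.isIn "## TARGET INDUSTRIES" (PySem.Str.strip raw) = true
      · have hA : pvAStep (pvProcGroup si (t, body), t) raw
            = (pvProcGroup si (t, body), some "industries") := by
          simp only [pvAStep]
          rw [if_neg h1, if_pos h2]
        rw [if_neg h1, if_pos h2, List.foldl_cons, ih, hA]
        rfl
      · by_cases h3 : PySem.Str.startswith (PySem.Str.strip raw) "## " = true
        · have hA : pvAStep (pvProcGroup si (t, body), t) raw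
              = (pvProcGroup si (t, body), none) := by
            simp only [pvAStep]
            rw [if_neg h1, if_neg h2, if_pos h3]
          rw [if_neg h1, if_neg h2, if_pos h3, List.foldl_cons, ih, hA]
          rfl
        · rw [if_neg h1, if_neg h2, if_neg h3, ih, pvStep_proc si t body raw h1 h2 h3]

-- ===== VERDICT (by name: the statement is the Claim_ definition above) =====
theorem extract_lists_from_analysis_py_spec : Claim_equal_extract_lists_from_analysis_py := by
  intro analysis _
  show extract_lists_from_analysis_py analysis = extract_lists_from_analysis_py_alt analysis
  have h := pvPhase1_spec ((PySem.Str.split? analysis "\n").getD []) [] none []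
  simp only [List.nil_append] at h
  have hB : extract_lists_from_analysis_py_alt analysis
      = List.foldl pvProcGroup ([], [])
          ((List.foldl pvPhase1Step ([], none, []) ((PySem.Str.split? analysis "\n").getD [])).1
            ++ [((List.foldl pvPhase1Step ([], none, []) ((PySem.Str.split? analysis "\n").getD [])).2.1,
                 (List.foldl pvPhase1Step ([], none, []) ((PySem.Str.split? analysis "\n").getD [])).2.2)]) := rfl
  rw [hB, h, pvMain]
  rfl
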